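-- pv_equiv track=rewrite | github.com/MTTVDN/API-Project | classes.py | lead_voices
-- ===== SOURCE A (Python) =====
-- from typing import List
--
-- def lead_voices(prev_chord: List[int], chord: List[int]) -> List[int]:
--     new_chord = []
--     voice_leads = []
--     for prev_note in prev_chord:
--         voice_leads.extend((prev_note, prev_note + 1, prev_note + 2, prev_note - 1, prev_note - 2))
--
--     for note in chord:
--         if note in voice_leads:
--             new_chord.append(note)
--         elif (note - 12) in voice_leads:
--             new_chord.append(note - 12)
--         elif (note + 12) in voice_leads:
--             new_chord.append(note + 12)
--         else:
--             new_chord.append(note)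
--     return new_chord
-- ===== SOURCE B (Python) =====
-- from typing import List
--
-- def lead_voices(prev_chord: List[int], chord: List[int]) -> List[int]:
--     # Merge the +-2 neighborhoods of prev_chord into disjoint sorted intervals.
--     intervals = []
--     for p in sorted(prev_chord):
--         if intervals and p - 2 <= intervals[-1][1] + 1:
--             lo, hi = intervals[-1]
--             intervals[-1] = (min(lo, p - 2), max(hi, p + 2))
--         else:
--             intervals.append((p - 2, p + 2))
--
--     def covered(n):
--         return any(lo <= n <= hi for lo, hi in intervals)
--
--     out = []
--     for note in chord:
--         if covered(note):
--             out.append(note)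
--         elif covered(note - 12):
--             out.append(note - 12)
--         elif covered(note + 12):
--             out.append(note + 12)
--         else:
--             out.append(note)
--     return out
-- ===== Notes on version B (the rewrite author's own statement) =====
-- stated objective: alternative
-- what changed: Replaces the 5x-expanded voice_leads neighbor table and its linear membership scans with sorting prev_chord and merging the +-2 neighborhoods into disjoint coverage intervals, against which each candidate note is range-tested.
import Mathlib
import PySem

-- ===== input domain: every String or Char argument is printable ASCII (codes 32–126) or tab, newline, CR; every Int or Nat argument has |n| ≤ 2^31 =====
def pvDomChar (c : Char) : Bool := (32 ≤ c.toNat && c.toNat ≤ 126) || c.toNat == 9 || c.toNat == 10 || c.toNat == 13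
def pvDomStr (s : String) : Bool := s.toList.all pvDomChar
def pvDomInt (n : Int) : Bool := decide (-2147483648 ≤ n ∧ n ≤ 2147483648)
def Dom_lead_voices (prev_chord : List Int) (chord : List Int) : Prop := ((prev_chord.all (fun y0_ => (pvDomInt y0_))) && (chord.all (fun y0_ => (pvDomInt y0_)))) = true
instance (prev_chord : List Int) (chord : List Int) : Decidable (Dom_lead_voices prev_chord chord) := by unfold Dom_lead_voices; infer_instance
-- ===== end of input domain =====

-- B replaces the 5x-expanded voice_leads table with sorted, merged ±2 coverage
-- intervals of prev_chord, against which each candidate note is range-tested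
-- (objective: alternative).

-- ===== PORT A =====
def lead_voices (prev_chord : List Int) (chord : List Int) : List Int :=
  let voice_leads : List Int :=
    prev_chord.foldl (fun acc p => acc ++ [p, p + 1, p + 2, p - 1, p - 2]) []
  chord.foldl (fun new_chord note =>
    if note ∈ voice_leads then new_chord ++ [note]
    else if (note - 12) ∈ voice_leads then new_chord ++ [note - 12]
    else if (note + 12) ∈ voice_leads then new_chord ++ [note + 12]
    else new_chord ++ [note]) []

-- ===== PORT B =====
-- body of the interval-merging loop: intervals[-1] is acc.getLast?, the
-- in-place update intervals[-1] = … is dropLast ++ [new last]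
def lead_voices_alt_mergeStep (acc : List (Int × Int)) (p : Int) : List (Int × Int) :=
  match acc.getLast? with
  | some (lo, hi) =>
      if p - 2 ≤ hi + 1 then acc.dropLast ++ [(min lo (p - 2), max hi (p + 2))]
      else acc ++ [(p - 2, p + 2)]
  | none => acc ++ [(p - 2, p + 2)]

def lead_voices_alt_covered (intervals : List (Int × Int)) (n : Int) : Bool :=
  intervals.any (fun lh => decide (lh.1 ≤ n ∧ n ≤ lh.2))

def lead_voices_alt (prev_chord : List Int) (chord : List Int) : List Int :=
  let intervals : List (Int × Int) :=
    (PySem.List.sorted prev_chord (fun x => x) false).foldl lead_voices_alt_mergeStep []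
  chord.foldl (fun out note =>
    if lead_voices_alt_covered intervals note then out ++ [note]
    else if lead_voices_alt_covered intervals (note - 12) then out ++ [note - 12]
    else if lead_voices_alt_covered intervals (note + 12) then out ++ [note + 12]
    else out ++ [note]) []

-- ===== PRECONDITION & SPEC =====
def Spec_lead_voices (prev_chord : List Int) (chord : List Int) (out : List Int) : Prop := out = lead_voices_alt prev_chord chord
instance (prev_chord : List Int) (chord : List Int) (out : List Int) : Decidable (Spec_lead_voices prev_chord chord out) := by unfold Spec_lead_voices; infer_instance

-- ===== CLAIM =====
def Claim_equal_lead_voices : Prop := ∀ (prev_chord : List Int) (chord : List Int), Dom_lead_voices prev_chord chord → Spec_lead_voices prev_chord chord (lead_voices prev_chord chord)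

-- ===== LEMMAS AND PROOFS =====

-- every lower bound of acc's interval starts survives a merge step that also bounds p-2
theorem mergeStep_lo_le (acc : List (Int × Int)) (p b : Int)
    (hb : ∀ y ∈ acc, y.1 ≤ b) (hp : p - 2 ≤ b) :
    ∀ x ∈ lead_voices_alt_mergeStep acc p, x.1 ≤ b := by
  rcases List.eq_nil_or_concat acc with rfl | ⟨as, a, rfl⟩
  · simp [lead_voices_alt_mergeStep]; omega
  · obtain ⟨lo, hi⟩ := a
    have hl : lo ≤ b := hb (lo, hi) (by simp)
    simp only [lead_voices_alt_mergeStep, List.concat_eq_append, List.getLast?_concat,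
      List.dropLast_concat]
    intro x hx
    split_ifs at hx with h
    · rcases List.mem_append.mp hx with hx | hx
      · exact hb x (by simp [hx])
      · simp at hx; subst hx; simp; omega
    · rcases List.mem_append.mp hx with hx | hx
      · exact hb x (by simp [hx])
      · simp at hx; subst hx; omega

-- one merge step preserves the covered set, adding exactly [p-2, p+2]
-- (needs that all existing interval starts lie at or below p-2: true on sorted input)
theorem covered_mergeStep (acc : List (Int × Int)) (p n : Int)
    (hlo : ∀ y ∈ acc, y.1 ≤ p - 2) :
    lead_voices_alt_covered (lead_voices_alt_mergeStep acc p) n =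
      (lead_voices_alt_covered acc n || decide (p - 2 ≤ n ∧ n ≤ p + 2)) := by
  rcases List.eq_nil_or_concat acc with rfl | ⟨as, a, rfl⟩
  · simp [lead_voices_alt_mergeStep, lead_voices_alt_covered]
  · obtain ⟨lo, hi⟩ := a
    have hl : lo ≤ p - 2 := hlo (lo, hi) (by simp)
    simp only [lead_voices_alt_mergeStep, List.concat_eq_append, List.getLast?_concat,
      List.dropLast_concat]
    split_ifs with h
    · rw [Bool.eq_iff_iff]
      simp only [lead_voices_alt_covered, List.any_append, List.any_cons, List.any_nil,
        Bool.or_eq_true, Bool.or_false, List.any_eq_true, decide_eq_true_eq]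
      constructor
      · rintro (hE | h2)
        · exact Or.inl (Or.inl hE)
        · by_cases h3 : lo ≤ n ∧ n ≤ hi
          · exact Or.inl (Or.inr h3)
          · exact Or.inr (by omega)
      · rintro ((hE | h3) | h4)
        · exact Or.inl hE
        · exact Or.inr (by omega)
        · exact Or.inr (by omega)
    · rw [Bool.eq_iff_iff]
      simp only [lead_voices_alt_covered, List.any_append, List.any_cons, List.any_nil,
        Bool.or_eq_true, Bool.or_false, List.any_eq_true, decide_eq_true_eq]

-- the merge fold over a sorted list covers exactly the union of the ±2 neighborhoods
theorem covered_fold (s : List Int) (acc : List (Int × Int)) (n : Int)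
    (hs : s.Pairwise (· ≤ ·))
    (hP : ∀ y ∈ acc, ∀ p ∈ s, y.1 ≤ p - 2) :
    lead_voices_alt_covered (s.foldl lead_voices_alt_mergeStep acc) n =
      (lead_voices_alt_covered acc n || s.any (fun p => decide (p - 2 ≤ n ∧ n ≤ p + 2))) := by
  induction s generalizing acc with
  | nil => simp
  | cons p t ih =>
      rcases List.pairwise_cons.mp hs with ⟨hhead, ht⟩
      rw [List.foldl_cons,
        ih (lead_voices_alt_mergeStep acc p) ht
          (fun y hy q hq =>
            mergeStep_lo_le acc p (q - 2)
              (fun z hz => hP z hz q (List.mem_cons_of_mem p hq))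
              (by have := hhead q hq; omega) y hy),
        covered_mergeStep acc p n (fun y hy => hP y hy p (List.mem_cons_self ..))]
      simp [Bool.or_assoc]

-- A's expanded table membership agrees with B's interval test
theorem mem_voice_leads_iff_covered (prev_chord : List Int) (n : Int) :
    (n ∈ prev_chord.foldl (fun acc p => acc ++ [p, p + 1, p + 2, p - 1, p - 2]) []) ↔
      lead_voices_alt_covered
        ((PySem.List.sorted prev_chord (fun x => x) false).foldl lead_voices_alt_mergeStep []) n = true := by
  rw [PySem.List.foldl_append_eq_flatMap,
    covered_fold _ _ _ (PySem.List.sorted_pairwise prev_chord (fun x => x)) (by simp)]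
  simp only [lead_voices_alt_covered, List.any_nil, Bool.false_or, List.any_eq_true,
    List.nil_append, List.mem_flatMap, PySem.List.mem_sorted, decide_eq_true_eq]
  constructor
  · rintro ⟨p, hp, h⟩
    refine ⟨p, hp, ?_⟩
    simp only [List.mem_cons, List.not_mem_nil, or_false] at h
    omega
  · rintro ⟨p, hp, h⟩
    refine ⟨p, hp, ?_⟩
    simp only [List.mem_cons, List.not_mem_nil, or_false]
    omega

-- ===== VERDICT =====
theorem lead_voices_spec : Claim_equal_lead_voices := by
  intro prev_chord chord _
  unfold Spec_lead_voices lead_voices lead_voices_alt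
  simp only []
  congr 1
  funext acc note
  simp only [mem_voice_leads_iff_covered prev_chord]
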